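-- pv_equiv track=rewrite | github.com/pabloschwarzenberg/grader | tema4_ej3/tema4_ej3_dd724f9fce4a2e00b679294dc181be55.py | traducir_a_jerigonzo
-- ===== SOURCE A (Python) =====
-- def traducir_a_jerigonzo(texto):
--     jerigonzo = ""
--     for caracter in texto:
--         if caracter.lower() in "aeiou":
--             jerigonzo += caracter + "p" + caracter.lower()
--         else:
--             jerigonzo += caracter
--     return jerigonzo
-- ===== SOURCE B (Python) =====
-- def traducir_a_jerigonzo(texto):
--     # Divide and conquer: the translation is a string homomorphism, so
--     # translate(x + y) == translate(x) + translate(y); recurse on halves.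
--     n = len(texto)
--     if n == 0:
--         return ""
--     if n == 1:
--         if texto.lower() in "aeiou":
--             return texto + "p" + texto.lower()
--         return texto
--     m = n // 2
--     return traducir_a_jerigonzo(texto[:m]) + traducir_a_jerigonzo(texto[m:])
-- ===== Notes on version B (the rewrite author's own statement) =====
-- stated objective: alternative
-- what changed: Replaces A's left-to-right accumulator loop with a divide-and-conquer recursion: the translation is a string homomorphism, so the string is split in halves, each half translated recursively, and the results concatenated; the only per-character work happens at single-character base cases.
import Mathlib
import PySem

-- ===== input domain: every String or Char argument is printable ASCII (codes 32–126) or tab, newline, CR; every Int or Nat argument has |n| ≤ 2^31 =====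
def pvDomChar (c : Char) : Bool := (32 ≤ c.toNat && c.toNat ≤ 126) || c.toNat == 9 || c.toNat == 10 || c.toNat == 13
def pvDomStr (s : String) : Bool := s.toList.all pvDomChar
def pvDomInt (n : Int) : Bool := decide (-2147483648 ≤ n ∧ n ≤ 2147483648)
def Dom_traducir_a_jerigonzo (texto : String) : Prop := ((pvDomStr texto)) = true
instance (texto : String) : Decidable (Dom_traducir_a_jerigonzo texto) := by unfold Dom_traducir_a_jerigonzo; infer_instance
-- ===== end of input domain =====

-- B replaces A's accumulator loop with a divide-and-conquer recursion on string
-- halves (translation is a homomorphism); alternative structure, not faster.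


-- ===== PORT A =====
def traducir_a_jerigonzo (texto : String) : String :=
  String.mk (texto.toList.foldl (fun jerigonzo caracter =>
    if PySem.Chars.isIn [PySem.Chars.lowerChar caracter] "aeiou".toList then
      jerigonzo ++ [caracter, 'p', PySem.Chars.lowerChar caracter]
    else
      jerigonzo ++ [caracter]) [])

-- ===== PORT B =====
-- Source B's divide-and-conquer recursion, on the character list
def jeriRec (l : List Char) : List Char :=
  if l.length = 0 then []
  else if l.length = 1 then
    if PySem.Chars.isIn (PySem.Chars.lower l) "aeiou".toList then
      l ++ 'p' :: PySem.Chars.lower l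
    else l
  else
    jeriRec (l.take (l.length / 2)) ++ jeriRec (l.drop (l.length / 2))
termination_by l.length
decreasing_by
  · simp [List.length_take]; omega
  · simp [List.length_drop]; omega

def traducir_a_jerigonzo_alt (texto : String) : String :=
  String.mk (jeriRec texto.toList)

-- ===== PRECONDITION & SPEC =====
def Spec_traducir_a_jerigonzo (texto : String) (out : String) : Prop := out = traducir_a_jerigonzo_alt texto
instance (texto : String) (out : String) : Decidable (Spec_traducir_a_jerigonzo texto out) := by unfold Spec_traducir_a_jerigonzo; infer_instance

-- ===== CLAIM (what is proved, stated in full; the proofs are below) =====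
def Claim_equal_traducir_a_jerigonzo : Prop := ∀ (texto : String), Dom_traducir_a_jerigonzo texto → Spec_traducir_a_jerigonzo texto (traducir_a_jerigonzo texto)

-- ===== LEMMAS AND PROOFS =====

-- the per-character translation both programs agree on
def jeriStep (c : Char) : List Char :=
  if PySem.Chars.isIn [PySem.Chars.lowerChar c] "aeiou".toList then
    [c, 'p', PySem.Chars.lowerChar c]
  else [c]

theorem jeri_foldl_eq (l : List Char) (acc : List Char) :
    l.foldl (fun jerigonzo caracter =>
      if PySem.Chars.isIn [PySem.Chars.lowerChar caracter] "aeiou".toList then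
        jerigonzo ++ [caracter, 'p', PySem.Chars.lowerChar caracter]
      else
        jerigonzo ++ [caracter]) acc
    = acc ++ l.flatMap jeriStep := by
  induction l generalizing acc with
  | nil => simp
  | cons c rest ih =>
    simp only [List.foldl_cons, List.flatMap_cons]
    rw [ih]
    unfold jeriStep
    split <;> simp

theorem jeriRec_eq : ∀ (n : Nat) (l : List Char), l.length ≤ n →
    jeriRec l = l.flatMap jeriStep := by
  intro n
  induction n with
  | zero =>
    intro l hl
    have : l = [] := List.eq_nil_of_length_eq_zero (Nat.le_zero.mp hl)
    subst this
    rw [jeriRec]; simp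
  | succ n ih =>
    intro l hl
    rw [jeriRec]
    by_cases h0 : l.length = 0
    · simp [List.eq_nil_of_length_eq_zero h0]
    · by_cases h1 : l.length = 1
      · obtain ⟨c, hc⟩ := List.length_eq_one_iff.mp h1
        subst hc
        simp [h1, jeriStep, PySem.Chars.lower]
      · simp only [h0, h1, if_false]
        have hlen : (l.take (l.length / 2)).length = min (l.length / 2) l.length := List.length_take
        have hdrop : (l.drop (l.length / 2)).length = l.length - l.length / 2 := List.length_drop
        rw [ih _ (by omega), ih _ (by omega), ← List.flatMap_append,
          List.take_append_drop]

-- ===== VERDICT (by name: the statement is the Claim_ definition above) =====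
theorem traducir_a_jerigonzo_spec : Claim_equal_traducir_a_jerigonzo := by
  intro texto _
  unfold Spec_traducir_a_jerigonzo traducir_a_jerigonzo traducir_a_jerigonzo_alt
  rw [jeri_foldl_eq, jeriRec_eq texto.toList.length _ le_rfl]
  simp
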